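-- pv_equiv track=rewrite | github.com/s02230225/VK_Algorithms_and_data_structures | homework3.py | find_added_char_array
-- ===== SOURCE A (Python) =====
-- def find_added_char_array(a, b):
--     count = [0] * 256
--     for ch in b:
--         count[ord(ch)] += 1
--     for ch in a:
--         count[ord(ch)] -= 1
--     for i in range(256):
--         if count[i] > 0:
--             return chr(i)
--     return ""
-- ===== SOURCE B (Python) =====
-- def find_added_char_array(a, b):
--     extra = {c for c in b if b.count(c) > a.count(c)}
--     return min(extra) if extra else ""
-- ===== Notes on version B (the rewrite author's own statement) =====
-- stated objective: simpler
-- what changed: Replaces the dense 256-slot count array plus an ordered 0..255 codepoint scan by a set comprehension of the characters occurring strictly more often in b than in a, returning min of that set (or "" when empty).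
import Mathlib
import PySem

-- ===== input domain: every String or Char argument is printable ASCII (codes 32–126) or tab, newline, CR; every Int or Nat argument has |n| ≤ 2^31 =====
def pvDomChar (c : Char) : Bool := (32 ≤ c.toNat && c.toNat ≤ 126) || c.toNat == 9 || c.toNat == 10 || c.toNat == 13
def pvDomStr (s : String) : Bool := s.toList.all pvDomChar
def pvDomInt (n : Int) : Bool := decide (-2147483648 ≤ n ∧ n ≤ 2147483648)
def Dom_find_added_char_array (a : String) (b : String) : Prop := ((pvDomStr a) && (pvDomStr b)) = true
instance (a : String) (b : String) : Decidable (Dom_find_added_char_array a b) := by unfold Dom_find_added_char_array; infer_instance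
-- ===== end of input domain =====

set_option maxRecDepth 4000


-- B replaces A's dense 256-slot count array and ordered 0..255 codepoint scan by the set of
-- characters occurring strictly more often in b than in a and a single min-selection (simpler).

-- ===== PORT A =====
def find_added_char_array (a : String) (b : String) : String :=
  let count : List Int := List.replicate 256 0
  let count := b.toList.foldl (fun cnt ch => cnt.modify ch.toNat (· + 1)) count
  let count := a.toList.foldl (fun cnt ch => cnt.modify ch.toNat (· - 1)) count
  match (List.range 256).find? (fun i => decide (0 < count.getD i 0)) with
  | some i => String.ofList [Char.ofNat i]
  | none => ""

-- ===== PORT B =====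
def find_added_char_array_alt (a : String) (b : String) : String :=
  let extra : PySem.Set Char :=
    PySem.Set.ofList (b.toList.filter (fun c => decide (a.toList.count c < b.toList.count c)))
  match extra.min? with
  | some c => String.ofList [c]
  | none => ""

-- ===== PRECONDITION & SPEC =====
def Spec_find_added_char_array (a : String) (b : String) (out : String) : Prop := out = find_added_char_array_alt a b
instance (a : String) (b : String) (out : String) : Decidable (Spec_find_added_char_array a b out) := by unfold Spec_find_added_char_array; infer_instance

-- ===== CLAIM (what is proved, stated in full; the proofs are below) =====
def Claim_equal_find_added_char_array : Prop := ∀ (a : String) (b : String), Dom_find_added_char_array a b → Spec_find_added_char_array a b (find_added_char_array a b)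

-- ===== LEMMAS AND PROOFS =====

lemma pv_length_foldl_modify (g : Int → Int) (l : List Char) (cnt : List Int) :
    (l.foldl (fun c ch => c.modify ch.toNat g) cnt).length = cnt.length := by
  induction l generalizing cnt with
  | nil => rfl
  | cons ch t ih => simp [List.foldl_cons, ih]

lemma pv_getD_modify (cnt : List Int) (j i : Nat) (f : Int → Int) (hi : i < cnt.length) :
    (cnt.modify j f).getD i 0 = if j = i then f (cnt.getD i 0) else cnt.getD i 0 := by
  rw [List.getD_eq_getElem _ _ (by simpa using hi), List.getD_eq_getElem _ _ hi,
      List.getElem_modify]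

lemma pv_foldl_modify_getD (g : Int → Int) (d : Int) (hg : ∀ x, g x = x + d) (l : List Char) :
    ∀ (cnt : List Int) (i : Nat), i < cnt.length →
    (l.foldl (fun c ch => c.modify ch.toNat g) cnt).getD i 0
      = cnt.getD i 0 + d * (l.countP (fun ch => ch.toNat == i)) := by
  induction l with
  | nil => intro cnt i hi; simp
  | cons ch t ih =>
    intro cnt i hi
    rw [List.foldl_cons, List.countP_cons,
        ih (cnt.modify ch.toNat g) i (by simpa using hi),
        pv_getD_modify cnt ch.toNat i g hi]
    by_cases h : ch.toNat = i
    · simp [h, hg]; ring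
    · simp [h]

lemma pv_toNat_ofNat_small (i : Nat) (h : i < 256) : (Char.ofNat i).toNat = i := by
  have hv : i.isValidChar := Or.inl (by omega)
  rw [Char.toNat_ofNat, if_pos hv]

lemma pv_countP_eq_count (l : List Char) (i : Nat) (h : i < 256) :
    l.countP (fun ch => ch.toNat == i) = l.count (Char.ofNat i) := by
  rw [List.count_eq_countP]
  apply List.countP_congr
  intro ch _
  simp only [beq_iff_eq]
  constructor
  · intro h1; rw [← h1, Char.ofNat_toNat]
  · intro h2; rw [h2, pv_toNat_ofNat_small i h]

lemma pv_char_le_iff (c d : Char) : c ≤ d ↔ c.toNat ≤ d.toNat := by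
  rw [Char.le_def, UInt32.le_iff_toNat_le]; rfl

lemma pv_find?_range_eq_some {p : Nat → Bool} {n : Nat} :
    ∀ i : Nat, (List.range n).find? p = some i ↔ i < n ∧ p i = true ∧ ∀ j < i, p j = false := by
  induction n with
  | zero =>
    intro i
    constructor
    · intro h; rw [List.range_zero, List.find?_nil] at h; simp at h
    · rintro ⟨hi, -, -⟩; omega
  | succ n ih =>
    intro i
    rw [List.range_succ, List.find?_append]
    rcases ho : (List.range n).find? p with _ | k
    · have hnone := List.find?_eq_none.mp ho
      rw [Option.none_or]
      by_cases hp : p n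
      · rw [List.find?_cons_of_pos hp]
        constructor
        · intro h
          have hni : n = i := Option.some.inj h
          subst hni
          refine ⟨by omega, hp, fun j hj => ?_⟩
          have := hnone j (List.mem_range.mpr hj)
          simpa using this
        · rintro ⟨hi, hpi, hmin⟩
          have : i = n := by
            by_contra hne
            have hlt : i < n := by omega
            exact (hnone i (List.mem_range.mpr hlt)) hpi
          simp [this]
      · rw [List.find?_cons_of_neg hp, List.find?_nil]
        constructor
        · intro h; simp at h
        · rintro ⟨hi, hpi, hmin⟩
          exfalso
          by_cases hin : i = n
          · subst hin; exact hp hpi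
          · exact (hnone i (List.mem_range.mpr (by omega))) hpi
    · rw [Option.some_or]
      have hk := (ih k).mp ho
      constructor
      · intro h
        have hki : k = i := Option.some.inj h
        subst hki
        exact ⟨by omega, hk.2.1, hk.2.2⟩
      · rintro ⟨hi, hpi, hmin⟩
        have : k = i := by
          rcases Nat.lt_trichotomy k i with h1 | h1 | h1
          · exact absurd hk.2.1 (by simp [hmin k h1])
          · exact h1
          · exact absurd hpi (by simp [hk.2.2 i h1])
        simp [this]

-- the final array entry i (i < 256) holds count_b(chr i) - count_a(chr i)
lemma pv_count_getD (a b : String) (i : Nat) (hi : i < 256) :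
    ((a.toList.foldl (fun cnt ch => cnt.modify ch.toNat (· - 1))
        (b.toList.foldl (fun cnt ch => cnt.modify ch.toNat (· + 1))
          (List.replicate 256 (0 : Int)))).getD i 0)
      = (b.toList.count (Char.ofNat i) : Int) - (a.toList.count (Char.ofNat i) : Int) := by
  have h1 : ((List.replicate 256 (0 : Int)).length) = 256 := by simp
  have hlen1 : (b.toList.foldl (fun cnt ch => cnt.modify ch.toNat (· + 1))
      (List.replicate 256 (0 : Int))).length = 256 := by
    rw [pv_length_foldl_modify, h1]
  rw [pv_foldl_modify_getD (· - 1) (-1) (fun x => by ring) a.toList _ i (by omega),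
      pv_foldl_modify_getD (· + 1) 1 (fun x => by ring) b.toList _ i (by omega)]
  have hz : (List.replicate 256 (0 : Int)).getD i 0 = 0 := by
    rw [List.getD_eq_getElem _ _ (by simp; omega)]
    exact List.getElem_replicate ..
  rw [hz, pv_countP_eq_count a.toList i hi, pv_countP_eq_count b.toList i hi]
  ring

lemma pv_mem_extra (a b : String) (c : Char) :
    c ∈ PySem.Set.ofList (b.toList.filter (fun c => decide (a.toList.count c < b.toList.count c)))
      ↔ c ∈ b.toList ∧ a.toList.count c < b.toList.count c := by
  rw [PySem.Set.mem_ofList, List.mem_filter]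
  simp

lemma pv_main (a b : String) (hDom : Dom_find_added_char_array a b) :
    find_added_char_array a b = find_added_char_array_alt a b := by
  unfold find_added_char_array find_added_char_array_alt
  dsimp only
  have hb : ∀ c ∈ b.toList, c.toNat < 256 := by
    intro c hc
    unfold Dom_find_added_char_array pvDomStr pvDomChar at hDom
    simp only [Bool.and_eq_true, List.all_eq_true] at hDom
    have := hDom.2 c hc
    simp only [Bool.or_eq_true, Bool.and_eq_true, decide_eq_true_eq, beq_iff_eq] at this
    omega
  set extra := PySem.Set.ofList
      (b.toList.filter (fun c => decide (a.toList.count c < b.toList.count c)))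
  rcases hmin : extra.min? with _ | c
  · -- no character occurs more often in b: both return ""
    have hempty := List.min?_eq_none_iff.mp hmin
    have hfind : (List.range 256).find? (fun i =>
        decide (0 < (a.toList.foldl (fun cnt ch => cnt.modify ch.toNat (· - 1))
          (b.toList.foldl (fun cnt ch => cnt.modify ch.toNat (· + 1))
            (List.replicate 256 (0 : Int)))).getD i 0)) = none := by
      rw [List.find?_eq_none]
      intro i hi
      have hi' := List.mem_range.mp hi
      simp only [decide_eq_true_eq, not_lt]
      rw [pv_count_getD a b i hi']
      by_contra hpos
      rw [not_le] at hpos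
      have hcnt : a.toList.count (Char.ofNat i) < b.toList.count (Char.ofNat i) := by omega
      have hmem : Char.ofNat i ∈ b.toList := List.count_pos_iff.mp (by omega)
      have : Char.ofNat i ∈ extra := (pv_mem_extra a b _).mpr ⟨hmem, hcnt⟩
      simp [hempty] at this
    rw [hfind]
  · -- minimal extra character c: A's scan stops exactly at codepoint c.toNat
    have hc := List.min?_eq_some_iff.mp hmin
    obtain ⟨hcmem, hcle⟩ := hc
    have hcprop := (pv_mem_extra a b c).mp hcmem
    have hc256 : c.toNat < 256 := hb c hcprop.1
    have hfind : (List.range 256).find? (fun i =>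
        decide (0 < (a.toList.foldl (fun cnt ch => cnt.modify ch.toNat (· - 1))
          (b.toList.foldl (fun cnt ch => cnt.modify ch.toNat (· + 1))
            (List.replicate 256 (0 : Int)))).getD i 0)) = some c.toNat := by
      rw [pv_find?_range_eq_some c.toNat]
      refine ⟨hc256, ?_, ?_⟩
      · simp only [decide_eq_true_eq]
        rw [pv_count_getD a b c.toNat hc256, Char.ofNat_toNat]
        omega
      · intro j hj
        simp only [decide_eq_false_iff_not, not_lt]
        rw [pv_count_getD a b j (by omega)]
        by_contra hpos
        rw [not_le] at hpos
        have hcnt : a.toList.count (Char.ofNat j) < b.toList.count (Char.ofNat j) := by omega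
        have hmem : Char.ofNat j ∈ b.toList := List.count_pos_iff.mp (by omega)
        have hje : Char.ofNat j ∈ extra := (pv_mem_extra a b _).mpr ⟨hmem, hcnt⟩
        have := (pv_char_le_iff c (Char.ofNat j)).mp (hcle _ hje)
        rw [pv_toNat_ofNat_small j (by omega)] at this
        omega
    rw [hfind]
    show String.ofList [Char.ofNat c.toNat] = String.ofList [c]
    rw [Char.ofNat_toNat]

-- ===== VERDICT (by name: the statement is the Claim_ definition above) =====
theorem find_added_char_array_spec : Claim_equal_find_added_char_array := by
  intro a b hDom
  unfold Spec_find_added_char_array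
  exact pv_main a b hDom
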